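-- pv_equiv track=rewrite | github.com/abramovychmax-cpu/under-preassure-tyre | generate_comprehensive.py | garmin_fit_crc
-- ===== SOURCE A (Python) =====
-- def garmin_fit_crc(data):
--     """Garmin FIT CRC (nibble-based, NOT CRC-16/CCITT)"""
--     crc_table = [
--         0x0000, 0xCC01, 0xD801, 0x1400, 0xF001, 0x3C00, 0x2800, 0xE401,
--         0xA001, 0x6C00, 0x7800, 0xB401, 0x5000, 0x9C01, 0x8801, 0x4400,
--     ]
--
--     crc = 0
--     for byte in data:
--         # compute checksum of lower four bits of byte
--         tmp = crc_table[crc & 0xF]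
--         crc = (crc >> 4) & 0x0FFF
--         crc = crc ^ tmp ^ crc_table[byte & 0xF]
--
--         # now compute checksum of upper four bits of byte
--         tmp = crc_table[crc & 0xF]
--         crc = (crc >> 4) & 0x0FFF
--         crc = crc ^ tmp ^ crc_table[(byte >> 4) & 0xF]
--     return crc
-- ===== SOURCE B (Python) =====
-- def garmin_fit_crc(data):
--     """Garmin FIT CRC computed bit-serially (reflected poly 0xA001), no lookup table."""
--     crc = 0
--     for byte in data:
--         crc ^= byte & 0xFF
--         for _ in range(8):
--             if crc & 1:
--                 crc = (crc >> 1) ^ 0xA001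
--             else:
--                 crc = crc >> 1
--     return crc
-- ===== Notes on version B (the rewrite author's own statement) =====
-- stated objective: alternative
-- what changed: Replaced the 16-entry nibble lookup table with the equivalent table-free bit-serial CRC-16/ARC: xor the low byte into crc, then 8 iterations of crc = (crc>>1)^0xA001 if crc&1 else crc>>1.
import Mathlib
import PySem

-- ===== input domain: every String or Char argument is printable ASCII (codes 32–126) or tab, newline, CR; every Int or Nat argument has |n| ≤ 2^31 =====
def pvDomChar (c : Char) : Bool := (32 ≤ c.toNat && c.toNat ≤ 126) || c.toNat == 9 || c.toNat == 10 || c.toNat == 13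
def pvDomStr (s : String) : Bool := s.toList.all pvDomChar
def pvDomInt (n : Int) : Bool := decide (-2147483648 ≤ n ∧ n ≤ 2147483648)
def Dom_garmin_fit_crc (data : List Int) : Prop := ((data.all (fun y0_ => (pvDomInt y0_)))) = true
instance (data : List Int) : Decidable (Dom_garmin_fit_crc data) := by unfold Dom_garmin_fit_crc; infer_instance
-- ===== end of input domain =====

-- B replaces A's 16-entry nibble lookup table by the equivalent table-free bit-serial
-- CRC-16/ARC loop (8 shift/xor iterations per byte); same cost class, no speed claim.

-- ===== PORT A =====
def pvCrcTable : List Int :=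
  [0x0000, 0xCC01, 0xD801, 0x1400, 0xF001, 0x3C00, 0x2800, 0xE401,
   0xA001, 0x6C00, 0x7800, 0xB401, 0x5000, 0x9C01, 0x8801, 0x4400]

-- per-byte body of A's loop; the list indices are (… & 0xF), always 0..15 and in
-- range, so Python's crc_table[…] never raises and '.getD 0' is never the default
def garminStepA (crc byte : Int) : Int :=
  let tmp := (PySem.List.pyGet? pvCrcTable (PySem.Int.band crc 15)).getD 0
  let crc1 := PySem.Int.band (crc >>> (4 : Nat)) 0xFFF
  let crc2 := PySem.Int.bxor (PySem.Int.bxor crc1 tmp)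
      ((PySem.List.pyGet? pvCrcTable (PySem.Int.band byte 15)).getD 0)
  let tmp2 := (PySem.List.pyGet? pvCrcTable (PySem.Int.band crc2 15)).getD 0
  let crc3 := PySem.Int.band (crc2 >>> (4 : Nat)) 0xFFF
  PySem.Int.bxor (PySem.Int.bxor crc3 tmp2)
      ((PySem.List.pyGet? pvCrcTable (PySem.Int.band (byte >>> (4 : Nat)) 15)).getD 0)

def garmin_fit_crc (data : List Int) : Int := data.foldl garminStepA 0

-- ===== PORT B =====
-- one iteration of Source B's inner 'for _ in range(8)' body
def garminBitStep (crc : Int) : Int :=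
  if PySem.Int.band crc 1 ≠ 0 then PySem.Int.bxor (crc >>> (1 : Nat)) 0xA001
  else crc >>> (1 : Nat)

-- per-byte body of B's loop: crc ^= byte & 0xFF, then 8 bit steps
def garminStepB (crc byte : Int) : Int :=
  let crc := PySem.Int.bxor crc (PySem.Int.band byte 255)
  (PySem.List.pyRange 0 8 1).foldl (fun c _ => garminBitStep c) crc

def garmin_fit_crc_alt (data : List Int) : Int := data.foldl garminStepB 0

-- ===== PRECONDITION & SPEC =====
def Spec_garmin_fit_crc (data : List Int) (out : Int) : Prop := out = garmin_fit_crc_alt data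
instance (data : List Int) (out : Int) : Decidable (Spec_garmin_fit_crc data out) := by unfold Spec_garmin_fit_crc; infer_instance

-- ===== CLAIM (what is proved, stated in full; the proofs are below) =====
def Claim_equal_garmin_fit_crc : Prop := ∀ (data : List Int), Dom_garmin_fit_crc data → Spec_garmin_fit_crc data (garmin_fit_crc data)

-- ===== LEMMAS AND PROOFS =====

-- Nat-level mirrors of the two per-byte computations
def natT (i : Nat) : Nat :=
  [0x0000, 0xCC01, 0xD801, 0x1400, 0xF001, 0x3C00, 0x2800, 0xE401,
   0xA001, 0x6C00, 0x7800, 0xB401, 0x5000, 0x9C01, 0x8801, 0x4400].getD i 0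

def natStepA (c b : Nat) : Nat :=
  ((c / 16) % 4096 ^^^ natT (c % 16) ^^^ natT (b % 16)) / 16 % 4096
    ^^^ natT (((c / 16) % 4096 ^^^ natT (c % 16) ^^^ natT (b % 16)) % 16) ^^^ natT (b / 16)

def natBit (c : Nat) : Nat := if c % 2 = 1 then (c / 2) ^^^ 0xA001 else c / 2
def natB4 (c : Nat) : Nat := natBit (natBit (natBit (natBit c)))
def natStepB (c b : Nat) : Nat := natB4 (natB4 (c ^^^ b))

def byteOf (x : Int) : Nat := (x % 256).toNat

theorem xor_xor_cancel (x y c : Nat) : (x ^^^ c) ^^^ (y ^^^ c) = x ^^^ y := by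
  simp [Nat.xor_comm, Nat.xor_left_comm]

theorem natBit_lin (a b : Nat) : natBit (a ^^^ b) = natBit a ^^^ natBit b := by
  -- the two mixed-parity branches only need xor associativity; the linter's unused-arg
  -- warnings on the shared simp set are spurious
  have hab : (a ^^^ b) % 2 = (a % 2) ^^^ (b % 2) := by
    calc (a ^^^ b) % 2 = (a ^^^ b) &&& 1 := (Nat.and_one_is_mod _).symm
      _ = (a &&& 1) ^^^ (b &&& 1) := Nat.and_xor_distrib_right
      _ = (a % 2) ^^^ (b % 2) := by rw [Nat.and_one_is_mod, Nat.and_one_is_mod]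
  have hd : (a ^^^ b) / 2 = a / 2 ^^^ b / 2 := by
    rw [← Nat.shiftRight_one, ← Nat.shiftRight_one, ← Nat.shiftRight_one]
    exact Nat.shiftRight_xor_distrib
  unfold natBit
  rcases Nat.mod_two_eq_zero_or_one a with ha | ha <;>
    rcases Nat.mod_two_eq_zero_or_one b with hb | hb <;>
      rw [ha, hb] at hab <;>
      simp [hab, ha, hb, hd, xor_xor_cancel, Nat.xor_assoc, Nat.xor_comm, Nat.xor_left_comm]

theorem natB4_lin (a b : Nat) : natB4 (a ^^^ b) = natB4 a ^^^ natB4 b := by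
  unfold natB4
  rw [natBit_lin, natBit_lin, natBit_lin, natBit_lin]

theorem natBit_even (m : Nat) : natBit (2 * m) = m := by
  unfold natBit
  have h1 : 2 * m % 2 = 0 := by omega
  have h2 : 2 * m / 2 = m := by omega
  simp [h1, h2]

theorem natB4_mul16 (q : Nat) : natB4 (16 * q) = q := by
  unfold natB4
  rw [show 16 * q = 2 * (8 * q) by ring, natBit_even,
      show 8 * q = 2 * (4 * q) by ring, natBit_even,
      show 4 * q = 2 * (2 * q) by ring, natBit_even, natBit_even]

theorem natB4_nib : ∀ r, r < 16 → natB4 r = natT r := by decide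

theorem xor_decomp (q r : Nat) (h : r < 16) : 16 * q ^^^ r = 16 * q + r := by
  have h1 : 16 * q + r = 16 * q ||| r := Nat.two_pow_add_eq_or_of_lt (i := 4) h q
  apply Nat.eq_of_testBit_eq
  intro i
  rw [h1, Nat.testBit_xor, Nat.testBit_or]
  rcases Nat.lt_or_ge i 4 with hi | hi
  · have : (16 * q).testBit i = false := by
      rw [show (16 : Nat) * q = q <<< 4 by simp [Nat.shiftLeft_eq]; ring]
      simp [Nat.testBit_shiftLeft, Nat.not_le.mpr hi]
    simp [this]
  · have hr : r < 2 ^ i :=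
      lt_of_lt_of_le h (le_trans (by norm_num) (Nat.pow_le_pow_right (by norm_num) hi))
    simp [Nat.testBit_lt_two_pow hr]

theorem natB4_char (c : Nat) (h : c < 65536) : natB4 c = c / 16 ^^^ natT (c % 16) := by
  have hm : c % 16 < 16 := Nat.mod_lt _ (by norm_num)
  calc natB4 c = natB4 (16 * (c / 16) ^^^ c % 16) := by
        rw [xor_decomp _ _ hm, Nat.div_add_mod]
    _ = natB4 (16 * (c / 16)) ^^^ natB4 (c % 16) := natB4_lin _ _
    _ = c / 16 ^^^ natT (c % 16) := by rw [natB4_mul16, natB4_nib _ hm]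

theorem natT_lt : ∀ r, r < 16 → natT r < 65536 := by decide

theorem xlt {a b : Nat} (ha : a < 65536) (hb : b < 65536) : a ^^^ b < 65536 :=
  Nat.xor_lt_two_pow (n := 16) (by norm_num at ha ⊢; exact ha) (by norm_num at hb ⊢; exact hb)

theorem natStepA_lt (c b : Nat) (hb : b < 256) : natStepA c b < 65536 := by
  unfold natStepA
  exact xlt (xlt (by omega) (natT_lt _ (by omega))) (natT_lt _ (by omega))

theorem natStep_eq (c b : Nat) (hc : c < 65536) (hb : b < 256) :
    natStepB c b = natStepA c b := by
  have hbl : b % 16 < 16 := by omega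
  have hbh : b / 16 < 16 := by omega
  have hcq : c / 16 < 4096 := by omega
  have hc1lt : c / 16 ^^^ natT (c % 16) ^^^ natT (b % 16) < 65536 :=
    xlt (xlt (by omega) (natT_lt _ (by omega))) (natT_lt _ (by omega))
  have hb4b : natB4 b = b / 16 ^^^ natT (b % 16) := natB4_char b (by omega)
  unfold natStepB natStepA
  rw [natB4_lin, natB4_char c hc, hb4b]
  rw [show c / 16 ^^^ natT (c % 16) ^^^ (b / 16 ^^^ natT (b % 16))
        = (c / 16 ^^^ natT (c % 16) ^^^ natT (b % 16)) ^^^ b / 16 by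
      simp [Nat.xor_comm, Nat.xor_left_comm]]
  rw [natB4_lin, natB4_char _ hc1lt, natB4_nib _ hbh]
  have hq2 : (c / 16 ^^^ natT (c % 16) ^^^ natT (b % 16)) / 16 < 4096 := by omega
  rw [Nat.mod_eq_of_lt hcq, Nat.mod_eq_of_lt hq2]

-- Python '& (2^k - 1)' is '% 2^k' on Int (two's-complement semantics)
theorem band15 (x : Int) : PySem.Int.band x 15 = x % 16 := by
  unfold PySem.Int.band
  split
  · rw [if_pos (by norm_num)]
    have h : (x.toNat &&& (15 : Int).toNat) = x.toNat % 16 := by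
      show x.toNat &&& 15 = _
      simpa using Nat.and_two_pow_sub_one_eq_mod x.toNat 4
    rw [h]; omega
  · rw [if_pos (by norm_num)]
    have h : ((15 : Int).toNat &&& (-x - 1).toNat) = (-x - 1).toNat % 16 := by
      show (15 : Nat) &&& (-x - 1).toNat = _
      rw [Nat.land_comm]
      simpa using Nat.and_two_pow_sub_one_eq_mod (-x - 1).toNat 4
    rw [h]; omega

theorem band255 (x : Int) : PySem.Int.band x 255 = x % 256 := by
  unfold PySem.Int.band
  split
  · rw [if_pos (by norm_num)]
    have h : (x.toNat &&& (255 : Int).toNat) = x.toNat % 256 := by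
      show x.toNat &&& 255 = _
      simpa using Nat.and_two_pow_sub_one_eq_mod x.toNat 8
    rw [h]; omega
  · rw [if_pos (by norm_num)]
    have h : ((255 : Int).toNat &&& (-x - 1).toNat) = (-x - 1).toNat % 256 := by
      show (255 : Nat) &&& (-x - 1).toNat = _
      rw [Nat.land_comm]
      simpa using Nat.and_two_pow_sub_one_eq_mod (-x - 1).toNat 8
    rw [h]; omega

theorem byteOf_lt (x : Int) : byteOf x < 256 := by
  unfold byteOf
  have h1 := Int.emod_nonneg x (show (256:Int) ≠ 0 by norm_num)
  have h2 := Int.emod_lt_of_pos x (show (0:Int) < 256 by norm_num)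
  omega

theorem lookup_eq : ∀ i, i < 16 → (PySem.List.pyGet? pvCrcTable (i : Nat)).getD 0 = ((natT i : Nat) : Int) := by decide

theorem band_nat (n m : Nat) : PySem.Int.band (n : Nat) (m : Nat) = ((n &&& m : Nat) : Int) :=
  PySem.Int.band_natCast n m

theorem byte_lo (x : Int) : PySem.Int.band x 15 = ((byteOf x % 16 : Nat) : Int) := by
  rw [band15]; unfold byteOf
  have h0 := Int.emod_nonneg x (show (256:Int) ≠ 0 by norm_num)
  have h1 := Int.emod_lt_of_pos x (show (0:Int) < 256 by norm_num)
  have h2 : x % 16 = (x % 256) % 16 := by omega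
  omega

theorem byte_hi (x : Int) : PySem.Int.band (x >>> (4 : Nat)) 15 = ((byteOf x / 16 : Nat) : Int) := by
  rw [band15, Int.shiftRight_eq_div_pow]
  unfold byteOf
  have h0 := Int.emod_nonneg x (show (256:Int) ≠ 0 by norm_num)
  have h1 := Int.emod_lt_of_pos x (show (0:Int) < 256 by norm_num)
  have h2 : (((2 ^ 4 : Nat) : Int)) = 16 := by norm_num
  rw [h2]
  omega

theorem crc_mask (n : Nat) :
    PySem.Int.band ((n : Int) >>> (4 : Nat)) 0xFFF = (((n / 16) % 4096 : Nat) : Int) := by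
  have hcast : ((n : Int) >>> (4 : Nat)) = ((n >>> 4 : Nat) : Int) := by simp
  rw [hcast, show (4095 : Int) = ((4095 : Nat) : Int) by norm_num, band_nat]
  congr 1
  rw [Nat.shiftRight_eq_div_pow]
  simpa using Nat.and_two_pow_sub_one_eq_mod (n / 2 ^ 4) 12

theorem bridgeA (x : Int) (n : Nat) : garminStepA (n : Nat) x = ((natStepA n (byteOf x) : Nat) : Int) := by
  unfold garminStepA natStepA
  dsimp only
  have hb15 : PySem.Int.band ((n : Nat) : Int) 15 = ((n % 16 : Nat) : Int) := by
    rw [show (15 : Int) = ((15 : Nat) : Int) by norm_num, band_nat]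
    congr 1
    simpa using Nat.and_two_pow_sub_one_eq_mod n 4
  rw [hb15, lookup_eq _ (by omega), crc_mask, byte_lo, lookup_eq _ (by omega)]
  rw [PySem.Int.bxor_natCast (n / 16 % 4096) (natT (n % 16)),
      PySem.Int.bxor_natCast (n / 16 % 4096 ^^^ natT (n % 16)) (natT (byteOf x % 16))]
  set c1 := n / 16 % 4096 ^^^ natT (n % 16) ^^^ natT (byteOf x % 16) with hc1
  have hb15' : PySem.Int.band ((c1 : Nat) : Int) 15 = ((c1 % 16 : Nat) : Int) := by
    rw [show (15 : Int) = ((15 : Nat) : Int) by norm_num, band_nat]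
    congr 1
    simpa using Nat.and_two_pow_sub_one_eq_mod c1 4
  rw [hb15', lookup_eq _ (by omega), crc_mask, byte_hi,
      lookup_eq _ (show byteOf x / 16 < 16 by have := byteOf_lt x; omega)]
  rw [PySem.Int.bxor_natCast (c1 / 16 % 4096) (natT (c1 % 16)),
      PySem.Int.bxor_natCast (c1 / 16 % 4096 ^^^ natT (c1 % 16)) (natT (byteOf x / 16))]

theorem bitBridge (m : Nat) : garminBitStep (m : Nat) = ((natBit m : Nat) : Int) := by
  unfold garminBitStep natBit
  have hb : PySem.Int.band ((m : Nat) : Int) 1 = ((m % 2 : Nat) : Int) := by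
    rw [show (1 : Int) = ((1 : Nat) : Int) by norm_num, band_nat]
    congr 1
    exact Nat.and_one_is_mod m
  have hs : ((m : Int) >>> (1 : Nat)) = ((m >>> 1 : Nat) : Int) := by simp
  rw [hb, hs, Nat.shiftRight_one]
  rcases Nat.mod_two_eq_zero_or_one m with h | h
  · rw [h]
    simp
  · rw [h]
    rw [if_pos (by norm_num), if_pos rfl]
    exact PySem.Int.bxor_natCast (m / 2) 0xA001

theorem bridgeB (x : Int) (n : Nat) : garminStepB (n : Nat) x = ((natStepB n (byteOf x) : Nat) : Int) := by
  unfold garminStepB natStepB natB4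
  dsimp only
  have h255 : PySem.Int.band x 255 = ((byteOf x : Nat) : Int) := by
    rw [band255]; unfold byteOf
    have h0 := Int.emod_nonneg x (show (256:Int) ≠ 0 by norm_num)
    omega
  have hrange : PySem.List.pyRange 0 8 1 = [0, 1, 2, 3, 4, 5, 6, 7] := by decide
  rw [h255, PySem.Int.bxor_natCast, hrange]
  simp only [List.foldl]
  rw [bitBridge, bitBridge, bitBridge, bitBridge, bitBridge, bitBridge, bitBridge, bitBridge]

theorem mainFold (l : List Int) (n : Nat) (hn : n < 65536) :
    l.foldl garminStepA (n : Nat) = l.foldl garminStepB (n : Nat) := by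
  induction l generalizing n with
  | nil => rfl
  | cons x t ih =>
    simp only [List.foldl]
    rw [bridgeA, bridgeB, natStep_eq _ _ hn (byteOf_lt x)]
    exact ih _ (natStepA_lt _ _ (byteOf_lt x))

-- ===== VERDICT (by name: the statement is the Claim_ definition above) =====
theorem garmin_fit_crc_spec : Claim_equal_garmin_fit_crc := by
  intro data _
  unfold Spec_garmin_fit_crc garmin_fit_crc garmin_fit_crc_alt
  have h := mainFold data 0 (by norm_num)
  simpa using h
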